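-- pv_equiv track=rewrite | github.com/ecar33/poketwo_identifier | name_identifier.py | search_dict_for_pokemon
-- ===== SOURCE A (Python) =====
-- def search_dict_for_pokemon(binary_hint, hint, all_hint_combinations):
--     list_of_possible_matches = all_hint_combinations[binary_hint]
--
--     for pokemon in list_of_possible_matches:
--         pokemon_char_index = 0
--         match = True
--         for char in hint:
--             if char != '_':
--                 if char.lower() != pokemon[pokemon_char_index].lower():
--                     match = False
--                     break
--             pokemon_char_index += 1
--
--         if match:
--             return pokemon
-- ===== SOURCE B (Python) =====
-- def search_dict_for_pokemon(binary_hint, hint, all_hint_combinations):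
--     candidates = all_hint_combinations[binary_hint]
--     for i, c in enumerate(hint):
--         if c != '_':
--             cl = c.lower()
--             candidates = [p for p in candidates if p[i:i+1].lower() == cl]
--     return candidates[0] if candidates else None
-- ===== Notes on version B (the rewrite author's own statement) =====
-- stated objective: alternative
-- what changed: B is position-major instead of candidate-major: it walks the hint once and, at each revealed position, narrows the whole candidate pool by a one-character slice comparison, returning the head of the surviving pool, instead of A's per-candidate re-walk of the hint with an index counter, match flag and break.
-- crash fix: On inputs where A raises IndexError (a candidate shorter than a revealed hint position is scanned, matching every earlier revealed position, before any full match) B's slice comparison p[i:i+1] treats the short candidate as a non-match and returns the first fully matching candidate or None. — e.g. on search_dict_for_pokemon("1", "_a", [("1", ["x", "ba"])]): A raises IndexError, B returns some "ba"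
import Mathlib
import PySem

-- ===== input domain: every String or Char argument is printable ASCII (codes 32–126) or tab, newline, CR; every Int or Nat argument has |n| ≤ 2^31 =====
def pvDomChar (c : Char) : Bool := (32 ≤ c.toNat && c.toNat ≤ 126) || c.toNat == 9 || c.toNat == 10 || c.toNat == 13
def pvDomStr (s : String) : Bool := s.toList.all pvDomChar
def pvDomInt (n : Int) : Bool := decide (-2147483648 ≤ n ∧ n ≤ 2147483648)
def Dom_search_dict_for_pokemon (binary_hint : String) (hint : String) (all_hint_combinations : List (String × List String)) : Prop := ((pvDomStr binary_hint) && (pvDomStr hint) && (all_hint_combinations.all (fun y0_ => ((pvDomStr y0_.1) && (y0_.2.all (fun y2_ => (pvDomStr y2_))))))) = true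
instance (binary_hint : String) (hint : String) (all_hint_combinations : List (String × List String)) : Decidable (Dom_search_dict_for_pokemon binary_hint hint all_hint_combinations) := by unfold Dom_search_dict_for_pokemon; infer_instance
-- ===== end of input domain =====

-- B replaces A's candidate-by-candidate hint walk with position-major staged filtering of the
-- candidate pool (objective: alternative decomposition); return-value equivalence only, no mutation.

-- dict lookup all_hint_combinations[binary_hint] (first match; none = KeyError, excluded by Pre_)
def pvLookup (binary_hint : String) (combos : List (String × List String)) : Option (List String) :=
  (combos.find? (fun kv => kv.1 == binary_hint)).map (fun kv => kv.2)

-- ===== PORT A =====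
-- A's inner loop: walk the hint with a manual counter; on a revealed char compare lowercased
-- characters and break with match=False on mismatch (out-of-range index = IndexError, outside Pre_).
def pvALoop : List Char → List Char → Nat → Bool
  | [], _, _ => true
  | c :: rest, pchars, i =>
    if c ≠ '_' then
      match pchars[i]? with
      | some pc =>
        if PySem.Chars.lowerChar c ≠ PySem.Chars.lowerChar pc then false
        else pvALoop rest pchars (i + 1)
      | none => false        -- Python raises IndexError here; such inputs are outside Pre_
    else pvALoop rest pchars (i + 1)

def pvAScan : List String → List Char → Option String
  | [], _ => none
  | p :: ps, h => if pvALoop h p.toList 0 then some p else pvAScan ps h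

def search_dict_for_pokemon (binary_hint : String) (hint : String) (all_hint_combinations : List (String × List String)) : Option String :=
  match pvLookup binary_hint all_hint_combinations with
  | some l => pvAScan l hint.toList
  | none => none               -- Python raises KeyError here; such inputs are outside Pre_

-- ===== PORT B =====
-- p[i:i+1].lower() == c.lower()   (slice of one char; empty for a too-short candidate, so no raise)
def pvBSlc (i : Int) (c : Char) (p : String) : Bool :=
  PySem.Chars.lower (PySem.List.slice p.toList (some i) (some (i + 1))) == PySem.Chars.lower [c]

-- one step of B's loop over enumerate(hint): on a revealed char, narrow the candidate pool
def pvBStep (cs : List String) (ic : Int × Char) : List String :=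
  if ic.2 ≠ '_' then cs.filter (pvBSlc ic.1 ic.2) else cs

def search_dict_for_pokemon_alt (binary_hint : String) (hint : String) (all_hint_combinations : List (String × List String)) : Option String :=
  match pvLookup binary_hint all_hint_combinations with
  | some candidates => ((PySem.List.enumerate hint.toList).foldl pvBStep candidates).head?
  | none => none               -- Python raises KeyError here; such inputs are outside Pre_

-- ===== PRECONDITION & SPEC =====
-- helpers for Pre_/Raises_ (independent of both ports): the revealed hint positions, whether a
-- candidate matches at one of them, matches at all of them, or makes A's walk hit IndexError
def pvRevealed (hint : String) : List (Int × Char) :=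
  (PySem.List.enumerate hint.toList).filter (fun ic => ic.2 ≠ '_')

def pvHit (p : String) (ic : Int × Char) : Bool :=
  match PySem.List.pyGet? p.toList ic.1 with
  | some pc => PySem.Chars.lowerChar pc == PySem.Chars.lowerChar ic.2
  | none => false

def pvFull (hint p : String) : Bool := (pvRevealed hint).all (pvHit p)

-- A's walk over p raises: some revealed position is past p's end while all earlier revealed ones match
def pvBad (hint p : String) : Bool :=
  (pvRevealed hint).any (fun ic =>
    decide ((p.toList.length : Int) ≤ ic.1) &&
    (pvRevealed hint).all (fun jc => !(decide (jc.1 < ic.1)) || pvHit p jc))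

-- Pre_ excludes exactly the inputs where the Python A raises: a binary_hint missing from the dict
-- (KeyError), and a candidate list whose scan reaches a too-short candidate — one that matches every
-- revealed position before a revealed index past its end — before any fully matching candidate
-- (IndexError). On every input where A returns, Pre_ holds.
def Pre_search_dict_for_pokemon (binary_hint : String) (hint : String) (all_hint_combinations : List (String × List String)) : Prop :=
  (pvLookup binary_hint all_hint_combinations).isSome = true ∧
  ∀ k, k < ((pvLookup binary_hint all_hint_combinations).getD []).length →
    pvBad hint (((pvLookup binary_hint all_hint_combinations).getD []).getD k "") = true →
    ∃ j, j < k ∧ pvFull hint (((pvLookup binary_hint all_hint_combinations).getD []).getD j "") = true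
instance (binary_hint : String) (hint : String) (all_hint_combinations : List (String × List String)) : Decidable (Pre_search_dict_for_pokemon binary_hint hint all_hint_combinations) := by unfold Pre_search_dict_for_pokemon; infer_instance

def pvWitness_search_dict_for_pokemon : String × String × (List (String × List String)) :=
  ("1", "a_", [("1", ["xb", "ab"])])

-- On inputs where A raises IndexError (a too-short candidate reached before any match), B's
-- slice-based comparison treats the short candidate as a non-match and returns normally.
def Raises_search_dict_for_pokemon (binary_hint : String) (hint : String) (all_hint_combinations : List (String × List String)) : Prop :=
  (pvLookup binary_hint all_hint_combinations).isSome = true ∧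
  ∃ k, k < ((pvLookup binary_hint all_hint_combinations).getD []).length ∧
    pvBad hint (((pvLookup binary_hint all_hint_combinations).getD []).getD k "") = true ∧
    ∀ j, j < k → ¬ pvFull hint (((pvLookup binary_hint all_hint_combinations).getD []).getD j "") = true
instance (binary_hint : String) (hint : String) (all_hint_combinations : List (String × List String)) : Decidable (Raises_search_dict_for_pokemon binary_hint hint all_hint_combinations) := by unfold Raises_search_dict_for_pokemon; infer_instance

def pvRaiseWitness_search_dict_for_pokemon : String × String × (List (String × List String)) :=
  ("1", "_a", [("1", ["x", "ba"])])
def pvRaiseWitnessOut_search_dict_for_pokemon : Option String := some "ba"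

def Spec_search_dict_for_pokemon (binary_hint : String) (hint : String) (all_hint_combinations : List (String × List String)) (out : Option String) : Prop := out = search_dict_for_pokemon_alt binary_hint hint all_hint_combinations
instance (binary_hint : String) (hint : String) (all_hint_combinations : List (String × List String)) (out : Option String) : Decidable (Spec_search_dict_for_pokemon binary_hint hint all_hint_combinations out) := by unfold Spec_search_dict_for_pokemon; infer_instance

-- ===== CLAIM (what is proved, stated in full; the proofs are below) =====
def Claim_equal_search_dict_for_pokemon : Prop := ∀ (binary_hint : String) (hint : String) (all_hint_combinations : List (String × List String)), Dom_search_dict_for_pokemon binary_hint hint all_hint_combinations → Pre_search_dict_for_pokemon binary_hint hint all_hint_combinations → Spec_search_dict_for_pokemon binary_hint hint all_hint_combinations (search_dict_for_pokemon binary_hint hint all_hint_combinations)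

def Claim_raises_search_dict_for_pokemon : Prop := (∀ (binary_hint : String) (hint : String) (all_hint_combinations : List (String × List String)), Dom_search_dict_for_pokemon binary_hint hint all_hint_combinations → Raises_search_dict_for_pokemon binary_hint hint all_hint_combinations → ¬ Pre_search_dict_for_pokemon binary_hint hint all_hint_combinations) ∧ (Dom_search_dict_for_pokemon (pvRaiseWitness_search_dict_for_pokemon.1) (pvRaiseWitness_search_dict_for_pokemon.2.1) (pvRaiseWitness_search_dict_for_pokemon.2.2) ∧ Raises_search_dict_for_pokemon (pvRaiseWitness_search_dict_for_pokemon.1) (pvRaiseWitness_search_dict_for_pokemon.2.1) (pvRaiseWitness_search_dict_for_pokemon.2.2) ∧ search_dict_for_pokemon_alt (pvRaiseWitness_search_dict_for_pokemon.1) (pvRaiseWitness_search_dict_for_pokemon.2.1) (pvRaiseWitness_search_dict_for_pokemon.2.2) = pvRaiseWitnessOut_search_dict_for_pokemon)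

-- ===== LEMMAS AND PROOFS =====
theorem pvWitness_ok : Dom_search_dict_for_pokemon pvWitness_search_dict_for_pokemon.1 pvWitness_search_dict_for_pokemon.2.1 pvWitness_search_dict_for_pokemon.2.2 ∧ Pre_search_dict_for_pokemon pvWitness_search_dict_for_pokemon.1 pvWitness_search_dict_for_pokemon.2.1 pvWitness_search_dict_for_pokemon.2.2 := by decide

-- B's one-position check at a natural index s is "the character at s exists, lowercased, equals c lowercased"
theorem pvBSlc_natCast (s : Nat) (c : Char) (p : String) :
    pvBSlc (s : Int) c p =
      match p.toList[s]? with
      | some pc => PySem.Chars.lowerChar pc == PySem.Chars.lowerChar c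
      | none => false := by
  unfold pvBSlc
  rw [show ((s : Int) + 1) = ((s : Int) + ((1 : Nat) : Int)) by norm_num,
      PySem.List.slice_natCast_add, List.take_one, List.head?_drop]
  cases p.toList[s]? <;> simp [PySem.Chars.lower]

-- A's inner loop started at counter s equals B's per-position checks over the hint suffix enumerated from s
theorem pvALoop_eq_all (hc : List Char) : ∀ (s : Nat) (p : String),
    pvALoop hc p.toList s =
      (PySem.List.enumerate hc (s : Int)).all (fun ic => (ic.2 == '_') || pvBSlc ic.1 ic.2 p) := by
  induction hc with
  | nil => intro s p; simp [pvALoop, PySem.List.enumerate]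
  | cons c rest ih =>
    intro s p
    have hcast : (s : Int) + 1 = ((s + 1 : Nat) : Int) := by push_cast; ring
    rw [PySem.List.enumerate_cons, hcast, List.all_cons]
    by_cases hc_ : c = '_'
    · subst hc_; simp [pvALoop, ih]
    · simp only [pvALoop, if_pos hc_, show (c == '_') = false by simp [hc_], Bool.false_or]
      rw [pvBSlc_natCast]
      cases hpc : p.toList[s]? with
      | none => simp
      | some pc =>
        by_cases he : PySem.Chars.lowerChar c = PySem.Chars.lowerChar pc
        · simp [he, ih]
        · simp [he, Ne.symm he]

-- B's staged filtering over any enumerated list collapses to one filter by the conjunction of its checks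
theorem pvFold_eq_filter (l : List (Int × Char)) : ∀ (cs : List String),
    l.foldl pvBStep cs = cs.filter (fun p => l.all (fun ic => (ic.2 == '_') || pvBSlc ic.1 ic.2 p)) := by
  induction l with
  | nil => intro cs; simp
  | cons ic rest ih =>
    intro cs
    rcases ic with ⟨i, c⟩
    by_cases h : c = '_'
    · subst h; simp [pvBStep, ih]
    · simp only [List.foldl_cons, pvBStep, if_pos h, List.all_cons,
        show (c == '_') = false by simp [h], Bool.false_or]
      rw [ih, List.filter_filter]
      exact List.filter_congr (fun p _ => by cases pvBSlc i c p <;> simp)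

-- A's first-match scan is head-of-filter by A's per-candidate test
theorem pvAScan_eq (cs : List String) (hc : List Char) :
    pvAScan cs hc = (cs.filter (fun p => pvALoop hc p.toList 0)).head? := by
  induction cs with
  | nil => simp [pvAScan]
  | cons p ps ih =>
    rw [pvAScan, List.filter_cons]
    cases pvALoop hc p.toList 0
    · simp [ih]
    · simp


-- ===== VERDICT (by name: the statements are the Claim_ definitions above) =====
theorem search_dict_for_pokemon_spec : Claim_equal_search_dict_for_pokemon := by
  intro bh hint combos _ _
  unfold Spec_search_dict_for_pokemon search_dict_for_pokemon search_dict_for_pokemon_alt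
  cases pvLookup bh combos with
  | none => rfl
  | some l =>
    simp only [pvAScan_eq, pvFold_eq_filter]
    congr 1
    exact List.filter_congr (fun p _ => by
      have h := pvALoop_eq_all hint.toList 0 p
      simpa using h)

theorem search_dict_for_pokemon_raises : Claim_raises_search_dict_for_pokemon := by
  unfold Claim_raises_search_dict_for_pokemon
  refine ⟨?_, by decide⟩
  rintro bh hint combos _ ⟨hs, k, hk, hbad, hnofull⟩ ⟨_, hpre⟩
  obtain ⟨j, hj, hfull⟩ := hpre k hk hbad
  exact hnofull j hj hfull

-- self-check: the recorded raise-witness facts, read back off the theorem above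
theorem pvRaiseWitness_ok : Dom_search_dict_for_pokemon pvRaiseWitness_search_dict_for_pokemon.1 pvRaiseWitness_search_dict_for_pokemon.2.1 pvRaiseWitness_search_dict_for_pokemon.2.2 ∧ Raises_search_dict_for_pokemon pvRaiseWitness_search_dict_for_pokemon.1 pvRaiseWitness_search_dict_for_pokemon.2.1 pvRaiseWitness_search_dict_for_pokemon.2.2 ∧ search_dict_for_pokemon_alt pvRaiseWitness_search_dict_for_pokemon.1 pvRaiseWitness_search_dict_for_pokemon.2.1 pvRaiseWitness_search_dict_for_pokemon.2.2 = pvRaiseWitnessOut_search_dict_for_pokemon := search_dict_for_pokemon_raises.2
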